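-- pv_equiv track=rewrite | github.com/sync-lab/ETCetera | sentient/Systems/Automata/Reduction/altsim.py | remove_controller_actions
-- ===== SOURCE A (Python) =====
-- from itertools import product, combinations, permutations
--
-- def remove_controller_actions(S, R):
--     rem_u = {x:set() for x in S}  # Actions marked to be removed
--     for x, tran in S.items():
--         for ((a, posta),(b, postb)) in permutations(tran.items(),2):
--             if a in rem_u[x] or b in rem_u[x]:  # already marked for removal
--                 continue
--             for xb in postb:
--                 if not any((xa,xb) in R for xa in posta):
--                     break  # for this xb, no xa...
--             else: # for every xb there is xa!
--                 rem_u[x].add(a)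
--
--     # Now remove actions
--     for x, us in rem_u.items():
--         for u in us:
--             del S[x][u]
--
--     return S
-- ===== SOURCE B (Python) =====
-- def remove_controller_actions(S, R):
--     # Precompute R-successor sets once; per state, build each action's cover
--     # set and mark dominated actions with O(1)-per-element subset tests,
--     # in the same order as the original permutation scan.
--     # Like the original, removes the marked actions from S in place.
--     succ = {}
--     for (u, v) in R:
--         succ.setdefault(u, set()).add(v)
--     succ_get = succ.get
--     for x, tran in S.items():
--         items = list(tran.items())
--         n = len(items)
--         posts = [p for (_, p) in items]
--         covs = []
--         for post in posts:
--             c = set()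
--             for xa in post:
--                 s = succ_get(xa)
--                 if s is not None:
--                     c |= s
--             covs.append(c)
--         marked = [False] * n
--         for i in range(n):
--             if marked[i]:
--                 continue
--             ci = covs[i]
--             for j in range(n):
--                 if j != i and not marked[j] and posts[j] <= ci:
--                     marked[i] = True
--                     break
--         for k in range(n):
--             if marked[k]:
--                 del tran[items[k][0]]
--     return S
-- ===== Notes on version B (the rewrite author's own statement) =====
-- stated objective: faster
-- what changed: B precomputes an R-successor dictionary once and per-state cover sets, replacing A's per-pair nested any/membership scans over posta x postb with one subset test per ordered pair (same sequential marking order); intended as faster: a timing run measured ~1.4x at the largest size both finished (below its 1.5x confirmation bar).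
import Mathlib
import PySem

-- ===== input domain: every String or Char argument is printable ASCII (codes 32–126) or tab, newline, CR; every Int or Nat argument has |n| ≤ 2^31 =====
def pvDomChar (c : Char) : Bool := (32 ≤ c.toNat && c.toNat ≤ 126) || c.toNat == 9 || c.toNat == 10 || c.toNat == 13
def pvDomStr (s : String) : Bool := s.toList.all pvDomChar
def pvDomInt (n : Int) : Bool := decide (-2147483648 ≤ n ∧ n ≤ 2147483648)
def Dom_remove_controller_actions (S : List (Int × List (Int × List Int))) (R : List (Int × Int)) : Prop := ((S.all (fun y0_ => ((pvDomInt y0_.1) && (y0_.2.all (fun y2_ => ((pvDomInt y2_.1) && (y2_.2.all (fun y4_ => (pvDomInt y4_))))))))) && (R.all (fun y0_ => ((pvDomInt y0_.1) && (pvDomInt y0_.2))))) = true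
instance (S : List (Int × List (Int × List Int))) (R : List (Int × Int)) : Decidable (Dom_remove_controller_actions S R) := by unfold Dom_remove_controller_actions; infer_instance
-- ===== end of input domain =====

-- B replaces A's per-pair quadruple nested membership scan by a precomputed
-- R-successor dictionary and per-state cover sets with subset tests, keeping
-- A's marking order (intended as faster; a timing run measured ~1.4x at the
-- largest size both finished, below its 1.5x confirmation bar). Like A, B deletes the marked actions
-- from its argument S in place; the theorems are about the return value.

-- ===== PORT A =====
def pvDflt : Int × List Int := (0, [])

-- 'for xb in postb: if not any((xa,xb) in R for xa in posta): break / else: mark'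
def pvCovered (R : List (Int × Int)) (posta postb : List Int) : Bool :=
  postb.all (fun xb => posta.any (fun xa => R.contains (xa, xb)))

-- permutations(tran.items(), 2): ordered pairs of distinct positions, index-lexicographic
def pvPerm2 (l : List (Int × List Int)) : List ((Int × List Int) × (Int × List Int)) :=
  (List.range l.length).flatMap (fun i =>
    (List.range l.length).filterMap (fun j =>
      if j = i then none else some (l.getD i pvDflt, l.getD j pvDflt)))

-- the rem_u[x] set for one state
def pvMarkA (R : List (Int × Int)) (tran : List (Int × List Int)) : PySem.Set Int :=
  (pvPerm2 tran).foldl (fun rem pq =>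
    if PySem.Set.contains rem pq.1.1 || PySem.Set.contains rem pq.2.1 then rem
    else if pvCovered R pq.1.2 pq.2.2 then PySem.Set.add rem pq.1.1 else rem)
    PySem.Set.empty

-- 'del S[x][u]' for the marked u: dict deletion keeps the order of the rest,
-- and the result does not depend on the set's iteration order
def remove_controller_actions (S : List (Int × List (Int × List Int))) (R : List (Int × Int)) : List (Int × List (Int × List Int)) :=
  S.map (fun xt => (xt.1, xt.2.filter (fun it => !(PySem.Set.contains (pvMarkA R xt.2) it.1))))

-- ===== PORT B =====
-- succ[u] = {v : (u,v) in R}  (succ.setdefault(u, set()).add(v))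
def pvSucc (R : List (Int × Int)) : PySem.Dict Int (PySem.Set Int) :=
  R.foldl (fun d p => d.modify p.1 [] (fun s => PySem.Set.add s p.2)) PySem.Dict.empty

-- c = set(); for xa in post: s = succ.get(xa); if s is not None: c |= s
def pvCovB (succ : PySem.Dict Int (PySem.Set Int)) (post : List Int) : PySem.Set Int :=
  post.foldl (fun c xa =>
    match succ.get? xa with
    | none => c
    | some s => PySem.Set.union c s) PySem.Set.empty

def pvCovsB (succ : PySem.Dict Int (PySem.Set Int)) (posts : List (List Int)) : List (PySem.Set Int) :=
  posts.map (pvCovB succ)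

-- the marking loop: 'if not marked[i]: for j: if j != i and not marked[j] and posts[j] <= covs[i]: marked[i] = True; break'
def pvMarkB (covs : List (PySem.Set Int)) (posts : List (List Int)) (n : Nat) : List Bool :=
  (List.range n).foldl (fun marked i =>
    if marked.getD i false then marked
    else if (List.range n).any (fun j =>
        (decide (j ≠ i)) && !(marked.getD j false)
          && PySem.Set.issubset (posts.getD j []) (covs.getD i []))
      then marked.set i true else marked)
    (List.replicate n false)

-- 'del tran[items[k][0]]' for marked k: dict deletion keeps the order of the rest
def remove_controller_actions_alt (S : List (Int × List (Int × List Int))) (R : List (Int × Int)) : List (Int × List (Int × List Int)) :=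
  let succ := pvSucc R
  S.map (fun xt =>
    let items := xt.2
    let n := items.length
    let posts := items.map Prod.snd
    let marked := pvMarkB (pvCovsB succ posts) posts n
    (xt.1, (List.range n).filterMap (fun k =>
      if marked.getD k false then none else some (items.getD k pvDflt))))

-- ===== PRECONDITION & SPEC =====
-- Pre_ excludes association lists whose state keys or per-state action keys repeat:
-- such lists do not represent Python dicts (S : dict[int, dict[int, set[int]]]), so
-- A never receives them and the encoding's behaviour there is accidental.
def Pre_remove_controller_actions (S : List (Int × List (Int × List Int))) (R : List (Int × Int)) : Prop :=
  (S.map Prod.fst).Nodup ∧ ∀ p ∈ S, (p.2.map Prod.fst).Nodup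
instance (S : List (Int × List (Int × List Int))) (R : List (Int × Int)) : Decidable (Pre_remove_controller_actions S R) := by unfold Pre_remove_controller_actions; infer_instance

def pvWitness_remove_controller_actions : (List (Int × List (Int × List Int))) × (List (Int × Int)) :=
  ([(0, [(0, [0]), (1, [1])])], [(0, 1)])

def Spec_remove_controller_actions (S : List (Int × List (Int × List Int))) (R : List (Int × Int)) (out : List (Int × List (Int × List Int))) : Prop := out = remove_controller_actions_alt S R
instance (S : List (Int × List (Int × List Int))) (R : List (Int × Int)) (out : List (Int × List (Int × List Int))) : Decidable (Spec_remove_controller_actions S R out) := by unfold Spec_remove_controller_actions; infer_instance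

-- ===== CLAIM (what is proved, stated in full; the proofs are below) =====
def Claim_equal_remove_controller_actions : Prop := ∀ (S : List (Int × List (Int × List Int))) (R : List (Int × Int)), Dom_remove_controller_actions S R → Pre_remove_controller_actions S R → Spec_remove_controller_actions S R (remove_controller_actions S R)

-- ===== LEMMAS AND PROOFS =====

-- membership in the successor dictionary
theorem pvSucc_mem (R : List (Int × Int)) (d : PySem.Dict Int (PySem.Set Int)) (u y : Int) :
    (y ∈ (R.foldl (fun d p => d.modify p.1 [] (fun s => PySem.Set.add s p.2)) d).getD u []) ↔
      y ∈ d.getD u [] ∨ (u, y) ∈ R := by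
  induction R generalizing d with
  | nil => simp
  | cons p R ih =>
      simp only [List.foldl_cons, ih, PySem.Dict.getD_modify, List.mem_cons]
      by_cases h : u = p.1
      · subst h
        simp only [if_true, PySem.Set.mem_add, Prod.ext_iff, true_and]
        tauto
      · rw [if_neg h]
        have : ¬ ((u, y) = p) := by
          intro he; exact h (congrArg Prod.fst he)
        tauto

theorem pvCovB_mem (succ : PySem.Dict Int (PySem.Set Int)) (post : List Int) (acc : PySem.Set Int) (y : Int) :
    (y ∈ post.foldl (fun c xa =>
        match succ.get? xa with
        | none => c
        | some s => PySem.Set.union c s) acc) ↔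
      y ∈ acc ∨ ∃ xa ∈ post, y ∈ succ.getD xa [] := by
  induction post generalizing acc with
  | nil => simp
  | cons xa post ih =>
      rw [List.foldl_cons]
      cases hg : succ.get? xa with
      | none =>
          rw [ih]
          have hd : succ.getD xa [] = [] := by
            rw [PySem.Dict.getD_eq_get?_getD, hg]; rfl
          simp [hd]
      | some s =>
          rw [ih]
          have hd : succ.getD xa [] = s := by
            rw [PySem.Dict.getD_eq_get?_getD, hg]; rfl
          simp only [PySem.Set.mem_union, List.mem_cons]
          constructor
          · rintro ((h | h) | ⟨z, hz, h⟩)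
            · exact Or.inl h
            · exact Or.inr ⟨xa, Or.inl rfl, by rw [hd]; exact h⟩
            · exact Or.inr ⟨z, Or.inr hz, h⟩
          · rintro (h | ⟨z, (rfl | hz), h⟩)
            · exact Or.inl (Or.inl h)
            · exact Or.inl (Or.inr (by rw [← hd]; exact h))
            · exact Or.inr ⟨z, hz, h⟩

-- the cover set decides A's inner scan
theorem pvCovB_contains (R : List (Int × Int)) (post : List Int) (y : Int) :
    PySem.Set.contains (pvCovB (pvSucc R) post) y = post.any (fun xa => R.contains (xa, y)) := by
  rw [Bool.eq_iff_iff]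
  simp only [PySem.Set.contains_iff, pvCovB, pvCovB_mem, pvSucc, pvSucc_mem, List.any_eq_true,
    List.contains_iff_mem]
  simp [PySem.Set.empty]

-- generic: two folds over the same list preserve a relation
theorem foldl_rel {α β γ : Type} (L : List γ) (f : α → γ → α) (g : β → γ → β)
    (Inv : α → β → Prop)
    (h : ∀ a b x, x ∈ L → Inv a b → Inv (f a x) (g b x)) :
    ∀ a b, Inv a b → Inv (L.foldl f a) (L.foldl g b) := by
  induction L with
  | nil => intro a b hab; exact hab
  | cons x L ih =>
      intro a b hab
      exact ih (fun a b z hz => h a b z (List.mem_cons_of_mem x hz))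
        (f a x) (g b x) (h a b x List.mem_cons_self hab)

theorem foldl_flatMap {α γ δ : Type} (L : List γ) (g : γ → List δ) (f : α → δ → α) (a : α) :
    (L.flatMap g).foldl f a = L.foldl (fun a x => (g x).foldl f a) a := by
  induction L generalizing a with
  | nil => rfl
  | cons x L ih => simp [List.flatMap_cons, List.foldl_append, ih]

theorem foldl_filterMap_if {α γ δ : Type} (L : List γ) (c : γ → Prop) [DecidablePred c]
    (e : γ → δ) (f : α → δ → α) (a : α) :
    (L.filterMap (fun x => if c x then none else some (e x))).foldl f a =
      L.foldl (fun a x => if c x then a else f a (e x)) a := by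
  induction L generalizing a with
  | nil => rfl
  | cons x L ih =>
      by_cases h : c x <;> simp [h, ih]

theorem any_congr_mem {α : Type} {L : List α} {p q : α → Bool}
    (h : ∀ a ∈ L, p a = q a) : L.any p = L.any q := by
  induction L with
  | nil => rfl
  | cons x L ih =>
      rw [List.any_cons, List.any_cons, h x List.mem_cons_self,
        ih (fun a ha => h a (List.mem_cons_of_mem x ha))]

-- filter by a predicate = filterMap over indices
theorem filter_eq_filterMap_range {α : Type} (L : List α) (p : α → Bool) (d : α) :
    L.filter p = (List.range L.length).filterMap
      (fun k => if p (L.getD k d) then some (L.getD k d) else none) := by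
  induction L with
  | nil => rfl
  | cons x L ih =>
      rw [List.length_cons, List.range_succ_eq_map, List.filterMap_cons, List.filterMap_map]
      have htail : (List.filterMap
          ((fun k => if p ((x :: L).getD k d) then some ((x :: L).getD k d) else none) ∘ Nat.succ)
          (List.range L.length)) =
          List.filterMap (fun k => if p (L.getD k d) then some (L.getD k d) else none)
            (List.range L.length) := by
        apply List.filterMap_congr
        intro k _
        rfl
      rw [htail, ← ih, List.filter_cons]
      by_cases h : p x
      · simp [h]
      · simp [h]

-- getD through map-of-range / map
theorem getD_map' {α β : Type} (l : List α) (i : Nat) (hi : i < l.length) (f : α → β) (d : β) (d' : α) :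
    (l.map f).getD i d = f (l.getD i d') := by
  rw [List.getD_eq_getElem?_getD, List.getElem?_map, List.getD_eq_getElem?_getD,
    List.getElem?_eq_getElem hi]; rfl

theorem contains_add_self (s : PySem.Set Int) (x : Int) :
    PySem.Set.contains (PySem.Set.add s x) x = true := by
  rw [PySem.Set.contains_iff, PySem.Set.mem_add]; exact Or.inr rfl

theorem contains_add_ne (s : PySem.Set Int) (x y : Int) (h : y ≠ x) :
    PySem.Set.contains (PySem.Set.add s x) y = PySem.Set.contains s y := by
  rw [Bool.eq_iff_iff, PySem.Set.contains_iff, PySem.Set.contains_iff, PySem.Set.mem_add]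
  simp [h]

theorem key_ne (items : List (Int × List Int)) (h : (items.map Prod.fst).Nodup)
    {i k : Nat} (hi : i < items.length) (hk : k < items.length) (hne : k ≠ i) :
    (items.getD k pvDflt).1 ≠ (items.getD i pvDflt).1 := by
  intro he
  apply hne
  have hk2 : k < (items.map Prod.fst).length := by simpa using hk
  have hi2 : i < (items.map Prod.fst).length := by simpa using hi
  have : (items.map Prod.fst)[k] = (items.map Prod.fst)[i] := by
    rw [List.getElem_map, List.getElem_map]
    have e1 : items[k] = items.getD k pvDflt := by
      rw [List.getD_eq_getElem?_getD, List.getElem?_eq_getElem hk]; rfl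
    have e2 : items[i] = items.getD i pvDflt := by
      rw [List.getD_eq_getElem?_getD, List.getElem?_eq_getElem hi]; rfl
    rw [e1, e2, he]
  exact (List.Nodup.getElem_inj_iff h).mp this

-- A's rem_u loop as a nested fold over index pairs
theorem pvMarkA_eq (R : List (Int × Int)) (l : List (Int × List Int)) :
    pvMarkA R l = (List.range l.length).foldl (fun rem i =>
      (List.range l.length).foldl (fun rem j =>
        if j = i then rem
        else if PySem.Set.contains rem (l.getD i pvDflt).1
               || PySem.Set.contains rem (l.getD j pvDflt).1 then rem
        else if pvCovered R (l.getD i pvDflt).2 (l.getD j pvDflt).2 then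
          PySem.Set.add rem (l.getD i pvDflt).1
        else rem) rem) PySem.Set.empty := by
  unfold pvMarkA pvPerm2
  rw [foldl_flatMap]
  congr 1
  funext rem i
  rw [foldl_filterMap_if (c := fun j => j = i)
    (e := fun j => (l.getD i pvDflt, l.getD j pvDflt))]

-- B's subset test is A's coverage test
theorem issubset_eq_covered (R : List (Int × Int)) (posta postb : List Int) :
    PySem.Set.issubset postb (pvCovB (pvSucc R) posta) = pvCovered R posta postb := by
  rw [Bool.eq_iff_iff, PySem.Set.issubset_iff]
  unfold pvCovered
  rw [List.all_eq_true]
  constructor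
  · intro h xb hb
    rw [← pvCovB_contains, PySem.Set.contains_iff]
    exact h xb hb
  · intro h xb hb
    rw [← PySem.Set.contains_iff, pvCovB_contains]
    exact h xb hb

-- once a_i is marked, the rest of A's inner pass over j leaves rem unchanged
theorem innerA_skip (R : List (Int × Int)) (items : List (Int × List Int)) (i : Nat)
    (L : List Nat) (a : PySem.Set Int)
    (hci : PySem.Set.contains a (items.getD i pvDflt).1 = true) :
    L.foldl (fun rem j =>
        if j = i then rem
        else if PySem.Set.contains rem (items.getD i pvDflt).1
               || PySem.Set.contains rem (items.getD j pvDflt).1 then rem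
        else if pvCovered R (items.getD i pvDflt).2 (items.getD j pvDflt).2 then
          PySem.Set.add rem (items.getD i pvDflt).1
        else rem) a = a := by
  induction L with
  | nil => rfl
  | cons j L ih =>
      rw [List.foldl_cons]
      by_cases hji : j = i
      · rw [if_pos hji]; exact ih
      · rw [if_neg hji, if_pos (by rw [hci]; rfl)]; exact ih

-- A's unmarked inner pass is a first-hit scan
theorem innerA_any (R : List (Int × Int)) (items : List (Int × List Int)) (i : Nat)
    (L : List Nat) (a : PySem.Set Int)
    (hci : PySem.Set.contains a (items.getD i pvDflt).1 = false) :
    L.foldl (fun rem j =>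
        if j = i then rem
        else if PySem.Set.contains rem (items.getD i pvDflt).1
               || PySem.Set.contains rem (items.getD j pvDflt).1 then rem
        else if pvCovered R (items.getD i pvDflt).2 (items.getD j pvDflt).2 then
          PySem.Set.add rem (items.getD i pvDflt).1
        else rem) a =
      if L.any (fun j => (decide (j ≠ i))
          && !(PySem.Set.contains a (items.getD j pvDflt).1)
          && pvCovered R (items.getD i pvDflt).2 (items.getD j pvDflt).2)
      then PySem.Set.add a (items.getD i pvDflt).1 else a := by
  induction L with
  | nil => rfl
  | cons j L ih =>
      rw [List.foldl_cons, List.any_cons]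
      by_cases hji : j = i
      · subst hji
        rw [if_pos rfl]
        simp only [ne_eq, not_true_eq_false, decide_false, Bool.false_and, Bool.false_or]
        exact ih
      · rw [if_neg hji]
        have hd : (decide (j ≠ i)) = true := by simp [hji]
        rw [hd, Bool.true_and]
        cases hcj : PySem.Set.contains a (items.getD j pvDflt).1 with
        | true =>
            rw [if_pos (by rw [hci]; rfl)]
            simp only [Bool.not_true, Bool.false_and, Bool.false_or]
            exact ih
        | false =>
            rw [if_neg (by rw [hci]; simp)]
            simp only [Bool.not_false, Bool.true_and]
            cases hC : pvCovered R (items.getD i pvDflt).2 (items.getD j pvDflt).2 with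
            | true =>
                rw [if_pos rfl, Bool.true_or, if_pos rfl]
                exact innerA_skip R items i L _ (contains_add_self a _)
            | false =>
                rw [if_neg (by simp), Bool.false_or]
                exact ih

-- the loop invariant tying A's action set to B's boolean list
def pvInv (items : List (Int × List Int)) (rem : PySem.Set Int) (m : List Bool) : Prop :=
  m.length = items.length ∧
    ∀ k, k < items.length →
      m.getD k false = PySem.Set.contains rem (items.getD k pvDflt).1

theorem pvMark_inv (R : List (Int × Int)) (items : List (Int × List Int))
    (h : (items.map Prod.fst).Nodup) :
    pvInv items (pvMarkA R items)
      (pvMarkB (pvCovsB (pvSucc R) (items.map Prod.snd)) (items.map Prod.snd) items.length) := by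
  rw [pvMarkA_eq]
  unfold pvMarkB
  apply foldl_rel _ _ _ (pvInv items) ?_ _ _ ?_
  · intro a b i hiR hinv
    have hi : i < items.length := List.mem_range.mp hiR
    obtain ⟨hlen, hval⟩ := hinv
    cases hci : PySem.Set.contains a (items.getD i pvDflt).1 with
    | true =>
        rw [innerA_skip R items i _ a hci, if_pos (by rw [hval i hi, hci])]
        exact ⟨hlen, hval⟩
    | false =>
        have hbi : b.getD i false = false := by rw [hval i hi, hci]
        have hany : ((List.range items.length).any (fun j =>
            (decide (j ≠ i)) && !(b.getD j false)
              && PySem.Set.issubset ((items.map Prod.snd).getD j [])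
                  ((pvCovsB (pvSucc R) (items.map Prod.snd)).getD i []))) =
            ((List.range items.length).any (fun j => (decide (j ≠ i))
              && !(PySem.Set.contains a (items.getD j pvDflt).1)
              && pvCovered R (items.getD i pvDflt).2 (items.getD j pvDflt).2)) := by
          apply any_congr_mem
          intro j hjR
          have hj : j < items.length := List.mem_range.mp hjR
          have hposts : ((items.map Prod.snd).getD j []) = (items.getD j pvDflt).2 :=
            getD_map' items j hj Prod.snd [] pvDflt
          have hlenp : i < (items.map Prod.snd).length := by simpa using hi
          have hcov : ((pvCovsB (pvSucc R) (items.map Prod.snd)).getD i []) =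
              pvCovB (pvSucc R) (items.getD i pvDflt).2 := by
            unfold pvCovsB
            rw [getD_map' (items.map Prod.snd) i hlenp (pvCovB (pvSucc R)) [] []]
            rw [getD_map' items i hi Prod.snd [] pvDflt]
          rw [hposts, hcov, issubset_eq_covered, hval j hj]
        rw [innerA_any R items i _ a hci, hbi, hany]
        cases hA : ((List.range items.length).any (fun j => (decide (j ≠ i))
            && !(PySem.Set.contains a (items.getD j pvDflt).1)
            && pvCovered R (items.getD i pvDflt).2 (items.getD j pvDflt).2)) with
        | false =>
            simp only [Bool.false_eq_true, if_false, reduceIte]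
            exact ⟨hlen, hval⟩
        | true =>
            simp only [Bool.false_eq_true, if_false, reduceIte]
            refine ⟨by rw [List.length_set]; exact hlen, ?_⟩
            intro k hk
            rw [List.getD_eq_getElem?_getD, List.getElem?_set]
            by_cases hik : i = k
            · subst hik
              rw [if_pos rfl, if_pos (hlen ▸ hi)]
              rw [contains_add_self]
              rfl
            · rw [if_neg hik, ← List.getD_eq_getElem?_getD, hval k hk,
                contains_add_ne _ _ _ (key_ne items h hi hk (fun hh => hik hh.symm))]
  · constructor
    · rw [List.length_replicate]
    · intro k hk
      have h1 : (List.replicate items.length false).getD k false = false := by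
        rw [List.getD_eq_getElem?_getD, List.getElem?_replicate]
        split <;> rfl
      have h2 : PySem.Set.contains (PySem.Set.empty : PySem.Set Int) (items.getD k pvDflt).1 = false := by
        rfl
      rw [h1, h2]

-- per-state agreement of the two ports
theorem pvState_eq (R : List (Int × Int)) (tran : List (Int × List Int))
    (h : (tran.map Prod.fst).Nodup) :
    tran.filter (fun it => !(PySem.Set.contains (pvMarkA R tran) it.1)) =
      (List.range tran.length).filterMap (fun k =>
        if (pvMarkB (pvCovsB (pvSucc R) (tran.map Prod.snd)) (tran.map Prod.snd) tran.length).getD k false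
        then none else some (tran.getD k pvDflt)) := by
  obtain ⟨hlen, hinv⟩ := pvMark_inv R tran h
  rw [filter_eq_filterMap_range tran _ pvDflt]
  apply List.filterMap_congr
  intro k hk
  rw [hinv k (List.mem_range.mp hk)]
  cases hcm : PySem.Set.contains (pvMarkA R tran) (tran.getD k pvDflt).1 <;> simp

-- ===== VERDICT (by name: the statement is the Claim_ definition above) =====
theorem remove_controller_actions_spec : Claim_equal_remove_controller_actions := by
  intro S R _hdom hpre
  unfold Pre_remove_controller_actions at hpre
  unfold Spec_remove_controller_actions remove_controller_actions remove_controller_actions_alt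
  apply List.map_congr_left
  intro xt hxt
  exact congrArg (Prod.mk xt.1) (pvState_eq R xt.2 (hpre.2 xt hxt))
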